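-- pv_equiv track=rewrite | github.com/hoadt6/BaiTap01 | hackathon1_midterm/easy.py | alpha_num
-- ===== SOURCE A (Python) =====
-- def alpha_num(sentence):
--     sentence_lst = sentence.split()
--     alpha_num_lst = []
--     existAlpha = False
--     existNum = False
--     for item in sentence_lst:
--          existAlpha = False
--          existNum = False
--          for i in item:
--              if i.isalpha():
--                  existAlpha = True
--              if i.isnumeric():
--                  existNum = True
--              if (existAlpha and existNum):
--                  alpha_num_lst.append(item)
--                  break
--
--     return alpha_num_lst
--     pass
-- ===== SOURCE B (Python) =====
-- def alpha_num(sentence):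
--     # single fused pass: tokenize and classify simultaneously, no split()
--     res = []
--     cur = []
--     has_a = False
--     has_n = False
--     for c in sentence:
--         if c.isspace():
--             if cur and has_a and has_n:
--                 res.append(''.join(cur))
--             cur = []
--             has_a = False
--             has_n = False
--         else:
--             cur.append(c)
--             has_a = has_a or c.isalpha()
--             has_n = has_n or c.isnumeric()
--     if cur and has_a and has_n:
--         res.append(''.join(cur))
--     return res
-- ===== Notes on version B (the rewrite author's own statement) =====
-- stated objective: alternative
-- what changed: Replaces A's split()-then-scan-each-word structure by a single fused character-level state machine over the raw string that tokenizes and classifies in one pass, emitting qualifying words at whitespace boundaries without ever calling split().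
import Mathlib
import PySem

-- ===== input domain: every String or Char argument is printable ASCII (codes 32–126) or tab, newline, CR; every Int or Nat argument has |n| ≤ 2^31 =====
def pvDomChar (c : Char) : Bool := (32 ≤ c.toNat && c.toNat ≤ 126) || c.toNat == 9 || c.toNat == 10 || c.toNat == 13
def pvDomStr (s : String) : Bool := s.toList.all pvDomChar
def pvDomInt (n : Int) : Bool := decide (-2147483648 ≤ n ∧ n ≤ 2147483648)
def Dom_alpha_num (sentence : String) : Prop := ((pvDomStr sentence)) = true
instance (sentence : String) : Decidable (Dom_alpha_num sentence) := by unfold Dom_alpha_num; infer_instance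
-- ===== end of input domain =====

-- B: one fused character-level state machine over the raw string (no split()), instead of A's split()-then-scan-each-word; alternative decomposition, same cost.
-- ===== PORT A =====
-- inner 'for i in item' loop: flags existAlpha/existNum, append item and break when both are set
-- (Python's isnumeric is PySem.Chars.isdigit here: exact on the ASCII domain Dom_alpha_num)
def alphaNumInner (item : String) (cs : List Char) (existAlpha existNum : Bool) (acc : List String) : List String :=
  match cs with
  | [] => acc
  | c :: rest =>
    let existAlpha := if PySem.Chars.isalpha c then true else existAlpha
    let existNum := if PySem.Chars.isdigit c then true else existNum
    if existAlpha && existNum then acc ++ [item]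
    else alphaNumInner item rest existAlpha existNum acc

def alpha_num (sentence : String) : List String :=
  (PySem.Str.split₀ sentence).foldl
    (fun acc item => alphaNumInner item item.toList false false acc) []

-- ===== PORT B =====
-- the 'for c in sentence' loop of Source B; the [] case is the post-loop flush
-- (isnumeric again ported as PySem.Chars.isdigit, and isspace as PySem.Chars.isspace, exact on ASCII)
def alphaNumScan (cs : List Char) (cur : List Char) (hasA hasN : Bool) (res : List String) : List String :=
  match cs with
  | [] => if !cur.isEmpty && hasA && hasN then res ++ [String.ofList cur] else res
  | c :: rest =>
    if PySem.Chars.isspace c then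
      if !cur.isEmpty && hasA && hasN then
        alphaNumScan rest [] false false (res ++ [String.ofList cur])
      else
        alphaNumScan rest [] false false res
    else
      alphaNumScan rest (cur ++ [c]) (hasA || PySem.Chars.isalpha c) (hasN || PySem.Chars.isdigit c) res

def alpha_num_alt (sentence : String) : List String :=
  alphaNumScan sentence.toList [] false false []

-- ===== PRECONDITION & SPEC =====
def Spec_alpha_num (sentence : String) (out : List String) : Prop := out = alpha_num_alt sentence
instance (sentence : String) (out : List String) : Decidable (Spec_alpha_num sentence out) := by unfold Spec_alpha_num; infer_instance

-- ===== CLAIM (what is proved, stated in full; the proofs are below) =====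
def Claim_equal_alpha_num : Prop := ∀ (sentence : String), Dom_alpha_num sentence → Spec_alpha_num sentence (alpha_num sentence)

-- ===== LEMMAS AND PROOFS =====
def pvPredC (w : List Char) : Bool := w.any PySem.Chars.isalpha && w.any PySem.Chars.isdigit

-- A's inner loop is the conjunction-of-scans predicate
lemma alphaNumInner_eq (item : String) (cs : List Char) (ea en : Bool) (acc : List String)
    (h : (ea && en) = false) :
    alphaNumInner item cs ea en acc =
      if (ea || cs.any PySem.Chars.isalpha) && (en || cs.any PySem.Chars.isdigit)
      then acc ++ [item] else acc := by
  induction cs generalizing ea en with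
  | nil => simp only [alphaNumInner, List.any_nil, Bool.or_false]; simp_all
  | cons c rest ih =>
    simp only [alphaNumInner]
    by_cases ha : PySem.Chars.isalpha c <;> by_cases hd : PySem.Chars.isdigit c <;>
      simp [ha, hd] at * <;>
      rcases ea with _|_ <;> rcases en with _|_ <;> simp_all

-- hence A = filter over the split words
lemma foldl_inner_eq_filter (l : List (List Char)) (acc : List String) :
    (l.map String.ofList).foldl (fun acc item => alphaNumInner item item.toList false false acc) acc =
      acc ++ (l.filter pvPredC).map String.ofList := by
  induction l generalizing acc with
  | nil => simp
  | cons w rest ih =>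
    simp only [List.map_cons, List.foldl_cons, List.filter_cons, ih]
    rw [alphaNumInner_eq (String.ofList w) (String.ofList w).toList false false acc (by simp)]
    have hkey : ((false || (String.ofList w).toList.any PySem.Chars.isalpha)
        && (false || (String.ofList w).toList.any PySem.Chars.isdigit)) = pvPredC w := by
      simp [pvPredC]
    rw [hkey]
    rcases hp : pvPredC w with _ | _ <;> simp [pvPredC] at hp <;>
      simp [hp, ih]

-- the split₀.go accumulator is prepended reversed
lemma split₀_go_acc (cs : List Char) (cur : List Char) (acc : List (List Char)) :
    PySem.Chars.split₀.go cs cur acc = acc.reverse ++ PySem.Chars.split₀.go cs cur [] := by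
  induction cs generalizing cur acc with
  | nil => by_cases h : cur.isEmpty <;> simp [PySem.Chars.split₀.go, h]
  | cons c rest ih =>
    simp only [PySem.Chars.split₀.go]
    by_cases hs : PySem.Chars.isspace c <;> by_cases hc : cur.isEmpty <;>
      simp [hs, hc, ih ([]) acc, ih ([]) (cur.reverse :: acc), ih ([]) ([cur.reverse]),
        ih (c :: cur) acc]

-- B's fused scan = filtered words of split₀.go, given the flag invariant
lemma scan_eq_go (cs : List Char) (cur : List Char) (res : List String) :
    alphaNumScan cs cur (cur.any PySem.Chars.isalpha) (cur.any PySem.Chars.isdigit) res =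
      res ++ ((PySem.Chars.split₀.go cs cur.reverse []).filter pvPredC).map String.ofList := by
  induction cs generalizing cur res with
  | nil =>
    have hcond : (!cur.isEmpty && cur.any PySem.Chars.isalpha && cur.any PySem.Chars.isdigit)
        = (!cur.isEmpty && pvPredC cur) := by simp [pvPredC, Bool.and_assoc]
    have hrev : cur.reverse.isEmpty = cur.isEmpty := by
      rcases cur with _ | ⟨x, xs⟩ <;> simp
    simp only [alphaNumScan, PySem.Chars.split₀.go, hcond, hrev, List.reverse_reverse]
    by_cases hc : cur.isEmpty = true
    · simp [hc]
    · rcases hp : pvPredC cur with _ | _ <;>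
        simp [hc, hp]
  | cons c rest ih =>
    have hcond : (!cur.isEmpty && cur.any PySem.Chars.isalpha && cur.any PySem.Chars.isdigit)
        = (!cur.isEmpty && pvPredC cur) := by simp [pvPredC, Bool.and_assoc]
    have hrev : cur.reverse.isEmpty = cur.isEmpty := by
      rcases cur with _ | ⟨x, xs⟩ <;> simp
    simp only [alphaNumScan, PySem.Chars.split₀.go, hcond, hrev, List.reverse_reverse]
    by_cases hs : PySem.Chars.isspace c
    · rw [if_pos hs, if_pos hs]
      have e1 := ih [] (res ++ [String.ofList cur])
      have e2 := ih [] res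
      simp only [List.any_nil, List.reverse_nil] at e1 e2
      by_cases hc : cur.isEmpty = true
      · have hnil : cur = [] := List.isEmpty_iff.mp hc
        subst hnil
        simpa using e2
      · rcases hp : pvPredC cur with _ | _ <;>
          simp [hc, hp, split₀_go_acc rest [] [cur], e1, e2]
    · rw [if_neg hs, if_neg hs]
      have h1 : (cur.any PySem.Chars.isalpha || PySem.Chars.isalpha c)
          = (cur ++ [c]).any PySem.Chars.isalpha := by simp
      have h2 : (cur.any PySem.Chars.isdigit || PySem.Chars.isdigit c)
          = (cur ++ [c]).any PySem.Chars.isdigit := by simp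
      rw [h1, h2]
      simpa using ih (cur ++ [c]) res

-- ===== VERDICT =====
theorem alpha_num_spec : Claim_equal_alpha_num := by
  intro s _
  unfold Spec_alpha_num alpha_num alpha_num_alt PySem.Str.split₀ PySem.Chars.split₀
  rw [foldl_inner_eq_filter]
  simpa using (scan_eq_go s.toList [] []).symm
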